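-- pv_equiv track=rewrite | github.com/bjornjee/Practice | question-bank/remove_duplicates.py | remove_duplicate_by_count
-- ===== SOURCE A (Python) =====
-- def remove_duplicate_by_count(s:str, threshold:int)->str:
--     stack=[]
--     i=0
--     while i<len(s):
--         j=i+1
--         while j<len(s) and s[j]==s[i]:
--             j+=1
--         forward = j-i
--         #lookback and count stack
--         k=len(stack)-1
--         while stack and k>=0 and stack[k]==s[i]:
--             k-=1
--         backward=len(stack)-k-1
--         if forward+backward >=threshold:
--             for h in range(backward):
--                 stack.pop()
--         else:
--             stack.extend(s[i:j])
--         i=j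
--     return ''.join(stack)
-- ===== SOURCE B (Python) =====
-- def remove_duplicate_by_count(s: str, threshold: int) -> str:
--     # Repeatedly delete the leftmost run whose length reaches the threshold,
--     # then rescan the shortened string from the start, until no run qualifies.
--     removed = True
--     while removed:
--         removed = False
--         i = 0
--         while i < len(s):
--             j = i
--             while j < len(s) and s[j] == s[i]:
--                 j += 1
--             if j - i >= threshold:
--                 s = s[:i] + s[j:]
--                 removed = True
--                 break
--             i = j
--     return s
-- ===== Notes on version B (the rewrite author's own statement) =====
-- stated objective: alternative
-- what changed: B keeps no stack at all: it repeatedly deletes the leftmost run whose length reaches the threshold from the string itself and rescans from the start until no run qualifies (a fixed-point rewriting view of the task), instead of A's single left-to-right pass with a character stack and a backward lookback scan.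
import Mathlib
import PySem

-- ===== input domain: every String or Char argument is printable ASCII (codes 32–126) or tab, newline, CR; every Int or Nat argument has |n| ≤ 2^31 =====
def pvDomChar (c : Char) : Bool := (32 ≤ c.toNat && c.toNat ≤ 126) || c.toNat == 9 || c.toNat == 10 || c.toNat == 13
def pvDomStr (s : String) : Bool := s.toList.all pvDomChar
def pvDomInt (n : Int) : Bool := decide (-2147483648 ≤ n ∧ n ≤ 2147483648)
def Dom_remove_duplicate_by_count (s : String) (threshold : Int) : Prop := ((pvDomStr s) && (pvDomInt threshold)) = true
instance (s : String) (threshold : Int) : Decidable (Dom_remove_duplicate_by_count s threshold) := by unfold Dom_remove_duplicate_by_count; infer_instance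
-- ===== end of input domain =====

-- B keeps no stack: it repeatedly deletes the leftmost run whose length reaches the
-- threshold and rescans the shortened string from the start until no run qualifies,
-- instead of A's one-pass character stack with a backward lookback scan; equal returns.
-- Loops are ported with an explicit fuel argument that provably bounds the iteration count.

-- ===== PORT A =====
-- inner while `while j<len(s) and s[j]==s[i]: j+=1`; fuel ≥ l.length - j makes it total
def pvRunEndAux (l : List Char) (c : Char) : Nat → Nat → Nat
  | 0, j => j
  | fuel + 1, j =>
    if h : j < l.length then
      if l[j] = c then pvRunEndAux l c fuel (j + 1) else j
    else j

def pvRunEndA (l : List Char) (c : Char) (j : Nat) : Nat :=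
  pvRunEndAux l c (l.length - j) j

-- lookback while `while stack and k>=0 and stack[k]==s[i]: k-=1`; fuel ≥ (k+1).toNat
def pvLookbackAux (stack : List Char) (c : Char) : Nat → Int → Int
  | 0, k => k
  | fuel + 1, k =>
    if stack ≠ [] ∧ 0 ≤ k ∧ stack.getD k.toNat ' ' = c then pvLookbackAux stack c fuel (k - 1)
    else k

def pvLookbackA (stack : List Char) (c : Char) (k : Int) : Int :=
  pvLookbackAux stack c (k + 1).toNat k

-- outer while over i; stack is the flat char list, extended by the slice s[i:j];
-- each iteration advances i to j > i, so fuel ≥ l.length - i suffices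
def pvLoopAAux (l : List Char) (t : Int) : Nat → List Char → Nat → List Char
  | 0, stack, _ => stack
  | fuel + 1, stack, i =>
    if h : i < l.length then
      let j := pvRunEndA l l[i] (i + 1)
      let k := pvLookbackA stack l[i] ((stack.length : Int) - 1)
      let backward : Int := (stack.length : Int) - k - 1
      if ((j : Int) - (i : Int)) + backward ≥ t then
        pvLoopAAux l t fuel (stack.take (stack.length - backward.toNat)) j
      else
        pvLoopAAux l t fuel (stack ++ (l.drop i).take (j - i)) j
    else stack

def remove_duplicate_by_count (s : String) (threshold : Int) : String :=
  String.ofList (pvLoopAAux s.toList threshold s.toList.length [] 0)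

-- ===== PORT B =====
-- B's inner while `while j < len(s) and s[j] == s[i]: j += 1`
def pvRunEndBAux (l : List Char) (c : Char) : Nat → Nat → Nat
  | 0, j => j
  | fuel + 1, j =>
    if h : j < l.length then
      if l[j] = c then pvRunEndBAux l c fuel (j + 1) else j
    else j

def pvRunEndB (l : List Char) (c : Char) (j : Nat) : Nat :=
  pvRunEndBAux l c (l.length - j) j

-- B's scan `while i < len(s): … if j - i >= threshold: … break; i = j`; it returns the
-- deleted span (the Python sets `removed` and breaks) or none; i advances by ≥ 1 each
-- iteration, so fuel ≥ l.length + 1 suffices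
def pvFindBAux (l : List Char) (t : Int) : Nat → Nat → Option (Nat × Nat)
  | 0, _ => none
  | fuel + 1, i =>
    if h : i < l.length then
      let j := pvRunEndB l l[i] i
      if ((j : Int) - (i : Int)) ≥ t then some (i, j)
      else pvFindBAux l t fuel j
    else none

-- B's outer `while removed:` loop; each deletion removes ≥ 1 char (`s = s[:i] + s[j:]`),
-- so fuel ≥ l.length + 1 suffices
def pvOuterB (t : Int) : Nat → List Char → List Char
  | 0, cs => cs
  | fuel + 1, cs =>
    match pvFindBAux cs t (cs.length + 1) 0 with
    | some (i, j) => pvOuterB t fuel (cs.take i ++ cs.drop j)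
    | none => cs

def remove_duplicate_by_count_alt (s : String) (threshold : Int) : String :=
  String.ofList (pvOuterB threshold (s.toList.length + 1) s.toList)

-- ===== PRECONDITION & SPEC =====
def Spec_remove_duplicate_by_count (s : String) (threshold : Int) (out : String) : Prop := out = remove_duplicate_by_count_alt s threshold
instance (s : String) (threshold : Int) (out : String) : Decidable (Spec_remove_duplicate_by_count s threshold out) := by unfold Spec_remove_duplicate_by_count; infer_instance

-- ===== CLAIM (what is proved, stated in full; the proofs are below) =====
def Claim_equal_remove_duplicate_by_count : Prop := ∀ (s : String) (threshold : Int), Dom_remove_duplicate_by_count s threshold → Spec_remove_duplicate_by_count s threshold (remove_duplicate_by_count s threshold)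

-- ===== LEMMAS AND PROOFS =====

-- A's loop characterised at run level: a stack of (char, run-length) pairs, top at the end
def pvRunLenAux (l : List Char) (c : Char) (i : Nat) : Nat → Nat → Nat
  | 0, cnt => cnt
  | fuel + 1, cnt =>
    if h : i + cnt < l.length then
      if l[i + cnt] = c then pvRunLenAux l c i fuel (cnt + 1) else cnt
    else cnt

def pvRunLenB (l : List Char) (c : Char) (i : Nat) : Nat :=
  pvRunLenAux l c i (l.length - i) 0

def pvRunsLoop (l : List Char) (t : Int) : Nat → List (Char × Nat) → Nat → List (Char × Nat)
  | 0, runs, _ => runs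
  | fuel + 1, runs, i =>
    if h : i < l.length then
      let c := l[i]
      let k := pvRunLenB l c i
      let p : List (Char × Nat) × Nat :=
        match runs.getLast? with
        | some q => if q.1 = c then (runs.dropLast, k + q.2) else (runs, k)
        | none => (runs, k)
      if (p.2 : Int) < t then pvRunsLoop l t fuel (p.1 ++ [(c, p.2)]) (i + k)
      else pvRunsLoop l t fuel p.1 (i + k)
    else runs

-- flatten a run stack into the flat char stack
def pvFlat (runs : List (Char × Nat)) : List Char :=
  runs.flatMap (fun q => List.replicate q.2 q.1)

-- loop invariant on the run stack: positive counts, adjacent runs have distinct chars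
def pvWF (runs : List (Char × Nat)) : Prop :=
  List.IsChain (fun p q => p.1 ≠ q.1) runs ∧ ∀ p ∈ runs, 1 ≤ p.2

theorem pvFlat_nil : pvFlat [] = [] := rfl

theorem pvFlat_concat (R : List (Char × Nat)) (p : Char × Nat) :
    pvFlat (R ++ [p]) = pvFlat R ++ List.replicate p.2 p.1 := by
  simp [pvFlat]

theorem pvFlat_cons (q : Char × Nat) (R : List (Char × Nat)) :
    pvFlat (q :: R) = List.replicate q.2 q.1 ++ pvFlat R := by
  simp [pvFlat]

theorem pvRunEndAux_ge (l : List Char) (c : Char) :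
    ∀ fuel j, j ≤ pvRunEndAux l c fuel j := by
  intro fuel
  induction fuel with
  | zero => intro j; simp [pvRunEndAux]
  | succ fuel ih =>
    intro j
    rw [pvRunEndAux]
    split_ifs with h hc
    · exact le_trans (by omega) (ih (j + 1))
    · exact le_refl j
    · exact le_refl j

theorem pvRunEndAux_le (l : List Char) (c : Char) :
    ∀ fuel j, j ≤ l.length → pvRunEndAux l c fuel j ≤ l.length := by
  intro fuel
  induction fuel with
  | zero => intro j hj; simpa [pvRunEndAux] using hj
  | succ fuel ih =>
    intro j hj
    rw [pvRunEndAux]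
    split_ifs with h hc
    · exact ih (j + 1) (by omega)
    · exact hj
    · exact hj

theorem pvRunEndAux_mem (l : List Char) (c : Char) :
    ∀ fuel j x, j ≤ x → x < pvRunEndAux l c fuel j → l[x]? = some c := by
  intro fuel
  induction fuel with
  | zero => intro j x h1 h2; simp [pvRunEndAux] at h2; omega
  | succ fuel ih =>
    intro j x h1 h2
    rw [pvRunEndAux] at h2
    split_ifs at h2 with h hc
    · rcases Nat.eq_or_lt_of_le h1 with rfl | hlt
      · simp [List.getElem?_eq_getElem h, hc]
      · exact ih (j + 1) x hlt h2
    · omega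
    · omega

theorem pvRunEndAux_stop (l : List Char) (c : Char) :
    ∀ fuel j, l.length ≤ fuel + j → pvRunEndAux l c fuel j < l.length →
      l[pvRunEndAux l c fuel j]? ≠ some c := by
  intro fuel
  induction fuel with
  | zero => intro j h1 h2; rw [pvRunEndAux] at h2 ⊢; omega
  | succ fuel ih =>
    intro j h1 h2
    rw [pvRunEndAux] at h2 ⊢
    split_ifs at h2 ⊢ with h hc
    · exact ih (j + 1) (by omega) h2
    · intro hco
      rw [List.getElem?_eq_getElem h] at hco
      exact hc (by simpa using hco)
    · omega

theorem pvRunEndA_ge (l : List Char) (c : Char) (j : Nat) : j ≤ pvRunEndA l c j :=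
  pvRunEndAux_ge l c _ j

theorem pvRunEndA_le (l : List Char) (c : Char) (j : Nat) (h : j ≤ l.length) :
    pvRunEndA l c j ≤ l.length :=
  pvRunEndAux_le l c _ j h

theorem pvRunEndA_mem (l : List Char) (c : Char) (j : Nat) :
    ∀ x, j ≤ x → x < pvRunEndA l c j → l[x]? = some c := by
  unfold pvRunEndA
  exact pvRunEndAux_mem l c _ j

theorem pvRunEndA_stop (l : List Char) (c : Char) (j : Nat) (hj : j ≤ l.length)
    (h : pvRunEndA l c j < l.length) : l[pvRunEndA l c j]? ≠ some c := by
  unfold pvRunEndA at h ⊢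
  exact pvRunEndAux_stop l c _ j (by omega) h

-- the run-counting scan agrees with A's end-index scan, step for step
theorem pvRunLenAux_eq (l : List Char) (c : Char) (i : Nat) :
    ∀ fuel cnt, i + pvRunLenAux l c i fuel cnt = pvRunEndAux l c fuel (i + cnt) := by
  intro fuel
  induction fuel with
  | zero => intro cnt; simp [pvRunLenAux, pvRunEndAux]
  | succ fuel ih =>
    intro cnt
    rw [pvRunLenAux, pvRunEndAux]
    split_ifs with h hc
    · rw [ih (cnt + 1), ← Nat.add_assoc]
    · rfl
    · rfl

theorem pvRunLenB_eq (l : List Char) (c : Char) (i : Nat) (hi : i < l.length)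
    (hc : l[i] = c) : i + pvRunLenB l c i = pvRunEndA l c (i + 1) := by
  unfold pvRunLenB pvRunEndA
  obtain ⟨fuel, hfu⟩ : ∃ fuel, l.length - i = fuel + 1 := ⟨l.length - i - 1, by omega⟩
  rw [hfu, pvRunLenAux, dif_pos (by omega : i + 0 < l.length)]
  rw [if_pos (by simpa using hc)]
  rw [pvRunLenAux_eq l c i fuel 1]
  congr 1
  omega

-- the slice s[i:j] of a run is a replicate of its char
theorem pvSlice_replicate (l : List Char) (i : Nat) (h : i < l.length) :
    (l.drop i).take (pvRunEndA l l[i] (i + 1) - i)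
      = List.replicate (pvRunEndA l l[i] (i + 1) - i) l[i] := by
  have hle : pvRunEndA l l[i] (i + 1) ≤ l.length := pvRunEndA_le l _ (i + 1) h
  have hge : i + 1 ≤ pvRunEndA l l[i] (i + 1) := pvRunEndA_ge l _ (i + 1)
  apply List.ext_getElem
  · simp; omega
  · intro n h1 h2
    simp only [List.getElem_take, List.getElem_drop, List.getElem_replicate]
    simp at h1
    rcases Nat.eq_zero_or_pos n with rfl | hn
    · simp
    · have := pvRunEndA_mem l l[i] (i + 1) (i + n) (by omega) (by omega)
      have hin : i + n < l.length := by omega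
      rw [List.getElem?_eq_getElem hin] at this
      simpa using this

-- behaviour of A's lookback loop on a stack ending in a run of m copies of c
theorem pvLookbackA_spec (c : Char) (F G : List Char) (m : Nat)
    (hF : F = [] ∨ ∃ e, F.getLast? = some e ∧ e ≠ c) :
    pvLookbackA (F ++ List.replicate m c ++ G) c ((F.length : Int) + m - 1)
      = (F.length : Int) - 1 := by
  induction m generalizing G with
  | zero =>
    unfold pvLookbackA
    rcases hF with rfl | ⟨e, he, hne⟩
    · have h0 : ((([] : List Char).length : Int) + ((0 : Nat) : Int) - 1 + 1).toNat = 0 := by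
        simp
      rw [h0, pvLookbackAux]
      simp
    · have hFlen : 0 < F.length := List.length_pos_of_ne_nil (by rintro rfl; simp at he)
      have h0 : ((F.length : Int) + ((0 : Nat) : Int) - 1 + 1).toNat = (F.length - 1) + 1 := by
        omega
      rw [h0, pvLookbackAux, if_neg]
      · push_cast; ring
      rintro ⟨-, -, hget⟩
      have hk : ((F.length : Int) + ((0 : Nat) : Int) - 1).toNat = F.length - 1 := by omega
      rw [hk] at hget
      have hval : (F ++ List.replicate 0 c ++ G).getD (F.length - 1) ' ' = e := by
        simp only [List.replicate_zero, List.append_nil]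
        rw [List.getD, List.getElem?_append_left (by omega)]
        rw [List.getLast?_eq_getElem?] at he
        simp [he]
      rw [hval] at hget
      exact hne hget
  | succ m ih =>
    have hassoc : F ++ List.replicate (m + 1) c ++ G
        = F ++ List.replicate m c ++ (c :: G) := by
      rw [List.replicate_succ']
      simp
    unfold pvLookbackA
    have h0 : ((F.length : Int) + (((m + 1 : Nat)) : Int) - 1 + 1).toNat
        = (F.length + m) + 1 := by omega
    rw [h0, pvLookbackAux, if_pos, hassoc]
    · have hk2 : (F.length : Int) + (((m + 1 : Nat)) : Int) - 1 - 1
          = (F.length : Int) + (m : Int) - 1 := by push_cast; ring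
      have hfu : F.length + m = (((F.length : Int) + (m : Int) - 1) + 1).toNat := by omega
      rw [hk2, hfu]
      exact ih (c :: G)
    refine ⟨by simp, by push_cast; omega, ?_⟩
    have hk : ((F.length : Int) + (((m + 1 : Nat)) : Int) - 1).toNat
        = (F ++ List.replicate m c).length := by simp; omega
    rw [hk, hassoc, List.getD]
    rw [show F ++ List.replicate m c ++ (c :: G)
        = (F ++ List.replicate m c) ++ (c :: G) by simp]
    rw [List.getElem?_append_right (by omega)]
    simp

theorem pvWF_concat_wf {R : List (Char × Nat)} {p : Char × Nat} (h : pvWF (R ++ [p])) :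
    pvWF R := by
  obtain ⟨hc, hpos⟩ := h
  exact ⟨(List.isChain_append.mp hc).1, fun q hq => hpos q (by simp [hq])⟩

theorem pvWF_concat_last {R : List (Char × Nat)} {p : Char × Nat} (h : pvWF (R ++ [p]))
    {e : Char × Nat} (he : R.getLast? = some e) : e.1 ≠ p.1 := by
  obtain ⟨hc, -⟩ := h
  exact (List.isChain_append.mp hc).2.2 e he p (by simp)

theorem pvFlat_getLast {R : List (Char × Nat)} (hpos : ∀ p ∈ R, 1 ≤ p.2)
    {e : Char × Nat} (he : R.getLast? = some e) :
    (pvFlat R).getLast? = some e.1 := by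
  rcases R.eq_nil_or_concat' with rfl | ⟨R', q, rfl⟩
  · simp at he
  · rw [List.getLast?_concat] at he
    cases he
    rw [pvFlat_concat]
    have h1 : 1 ≤ e.2 := hpos e (by simp)
    have hne : List.replicate e.2 e.1 ≠ [] := by simp; omega
    rw [List.getLast?_append_of_ne_nil _ hne]
    obtain ⟨n, hn⟩ : ∃ n, e.2 = n + 1 := ⟨e.2 - 1, by omega⟩
    rw [hn, List.replicate_succ', List.getLast?_concat]

-- A's char-level loop on the flattened stack equals the run-level loop, flattened
theorem pvLoop_eq (l : List Char) (t : Int) :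
    ∀ fuel i runs, pvWF runs →
      pvLoopAAux l t fuel (pvFlat runs) i = pvFlat (pvRunsLoop l t fuel runs i) := by
  intro fuel
  induction fuel with
  | zero => intro i runs _; rw [pvLoopAAux, pvRunsLoop]
  | succ fuel ih =>
    intro i runs hwf
    by_cases hi : i < l.length
    case neg => rw [pvLoopAAux, pvRunsLoop, dif_neg hi, dif_neg hi]
    rw [pvLoopAAux, pvRunsLoop, dif_pos hi, dif_pos hi]
    have hge := pvRunEndA_ge l l[i] (i + 1)
    have hle := pvRunEndA_le l l[i] (i + 1) hi
    have hslice := pvSlice_replicate l i hi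
    have hrun := pvRunLenB_eq l l[i] i hi rfl
    generalize hc : l[i] = c at hge hle hslice hrun ⊢
    generalize hj : pvRunEndA l c (i + 1) = j at hge hle hslice hrun ⊢
    have hk : pvRunLenB l c i = j - i := by omega
    dsimp only
    rw [hk, show i + (j - i) = j by omega]
    rcases runs.eq_nil_or_concat' with rfl | ⟨R, q, rfl⟩
    · -- empty stack: backward = 0
      have hlb : pvLookbackA ([] : List Char) c ((0 : Int) - 1) = (0 : Int) - 1 := by
        unfold pvLookbackA
        rw [show ((0 : Int) - 1 + 1).toNat = 0 by omega, pvLookbackAux]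
      simp only [pvFlat_nil, List.getLast?_nil, List.length_nil, Nat.cast_zero]
      rw [hlb]
      split_ifs with h1 h2 h2
      · exfalso; omega
      · rw [List.take_nil]
        exact ih j [] ⟨by simp, by simp⟩
      · have hwf' : pvWF [(c, j - i)] := ⟨by simp, by simp; omega⟩
        have := ih j [(c, j - i)] hwf'
        simpa [hslice, pvFlat] using this
      · exfalso; omega
    · -- stack ends in run q
      have hq1 : 1 ≤ q.2 := hwf.2 q (by simp)
      rw [List.getLast?_concat, List.dropLast_concat, pvFlat_concat]
      try dsimp only
      have hwfR : pvWF R := pvWF_concat_wf hwf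
      have hFR : pvFlat R = [] ∨ ∃ e, (pvFlat R).getLast? = some e ∧ e ≠ q.1 := by
        rcases hR : R.getLast? with - | e
        · left
          rcases R.eq_nil_or_concat' with rfl | ⟨R', q', rfl⟩
          · rfl
          · rw [List.getLast?_concat] at hR; cases hR
        · exact Or.inr ⟨e.1, pvFlat_getLast hwfR.2 hR, pvWF_concat_last hwf hR⟩
      by_cases hqc : q.1 = c
      · -- top run has the current char: backward = q.2
        simp only [if_pos hqc]
        try dsimp only
        try simp only [hqc]
        rw [hqc] at hFR
        have hlen : (pvFlat R ++ List.replicate q.2 c).length = (pvFlat R).length + q.2 := by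
          simp
        have hlb : pvLookbackA (pvFlat R ++ List.replicate q.2 c) c
            (((pvFlat R ++ List.replicate q.2 c).length : Int) - 1)
            = ((pvFlat R).length : Int) - 1 := by
          have h0 := pvLookbackA_spec c (pvFlat R) [] q.2 hFR
          simp only [List.append_nil] at h0
          rw [show ((pvFlat R ++ List.replicate q.2 c).length : Int) - 1
              = ((pvFlat R).length : Int) + q.2 - 1 by rw [hlen]; push_cast; ring]
          exact h0
        split_ifs with h1 h2 h2
        · exfalso; omega
        · have hn : (pvFlat R ++ List.replicate q.2 c).length
              - (((pvFlat R ++ List.replicate q.2 c).length : Int)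
                  - pvLookbackA (pvFlat R ++ List.replicate q.2 c) c
                      (((pvFlat R ++ List.replicate q.2 c).length : Int) - 1) - 1).toNat
              = (pvFlat R).length := by omega
          rw [hn, List.take_left]
          exact ih j R hwfR
        · rw [hslice, show pvFlat R ++ List.replicate q.2 c ++ List.replicate (j - i) c
              = pvFlat (R ++ [(c, j - i + q.2)]) by
            rw [pvFlat_concat, show j - i + q.2 = q.2 + (j - i) by omega,
                List.replicate_add, List.append_assoc]]
          have hwf' : pvWF (R ++ [(c, j - i + q.2)]) := by
            refine ⟨?_, ?_⟩
            · refine List.IsChain.append hwfR.1 (by simp) ?_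
              intro x hx y hy
              simp at hy; subst hy
              exact hqc ▸ pvWF_concat_last hwf hx
            · intro p hp
              rcases List.mem_append.mp hp with hp | hp
              · exact hwf.2 p (by simp [hp])
              · simp at hp; subst hp; simp; omega
          exact ih j (R ++ [(c, j - i + q.2)]) hwf'
        · exfalso; omega
      · -- top run has a different char: backward = 0
        simp only [if_neg hqc]
        try dsimp only
        have hFne : ∃ e, (pvFlat R ++ List.replicate q.2 q.1).getLast? = some e ∧ e ≠ c := by
          refine ⟨q.1, ?_, hqc⟩
          rw [← pvFlat_concat]
          exact pvFlat_getLast hwf.2 List.getLast?_concat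
        have hlb : pvLookbackA (pvFlat R ++ List.replicate q.2 q.1) c
            (((pvFlat R ++ List.replicate q.2 q.1).length : Int) - 1)
            = ((pvFlat R ++ List.replicate q.2 q.1).length : Int) - 1 := by
          have h0 := pvLookbackA_spec c (pvFlat R ++ List.replicate q.2 q.1) [] 0 (Or.inr hFne)
          simp only [List.replicate_zero, List.append_nil, Nat.cast_zero, add_zero] at h0
          exact h0
        split_ifs with h1 h2 h2
        · exfalso; omega
        · have hn : (pvFlat R ++ List.replicate q.2 q.1).length
              - (((pvFlat R ++ List.replicate q.2 q.1).length : Int)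
                  - pvLookbackA (pvFlat R ++ List.replicate q.2 q.1) c
                      (((pvFlat R ++ List.replicate q.2 q.1).length : Int) - 1) - 1).toNat
              = (pvFlat R ++ List.replicate q.2 q.1).length := by omega
          rw [hn, List.take_length]
          have := ih j (R ++ [q]) hwf
          rw [pvFlat_concat] at this
          exact this
        · rw [hslice, show pvFlat R ++ List.replicate q.2 q.1 ++ List.replicate (j - i) c
              = pvFlat ((R ++ [q]) ++ [(c, j - i)]) by
            rw [pvFlat_concat, pvFlat_concat]]
          have hwf' : pvWF ((R ++ [q]) ++ [(c, j - i)]) := by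
            refine ⟨?_, ?_⟩
            · refine List.IsChain.append hwf.1 (by simp) ?_
              intro x hx y hy
              simp at hy; subst hy
              rw [List.getLast?_concat] at hx
              cases hx
              exact hqc
            · intro p hp
              rcases List.mem_append.mp hp with hp | hp
              · exact hwf.2 p hp
              · simp at hp; subst hp; simp; omega
          exact ih j ((R ++ [q]) ++ [(c, j - i)]) hwf'
        · exfalso; omega

-- ===== run-level machinery for B =====

def pvStep (t : Int) (S : List (Char × Nat)) (q : Char × Nat) : List (Char × Nat) :=
  let p : List (Char × Nat) × Nat :=
    match S.getLast? with
    | some r => if r.1 = q.1 then (S.dropLast, q.2 + r.2) else (S, q.2)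
    | none => (S, q.2)
  if (p.2 : Int) < t then p.1 ++ [(q.1, p.2)] else p.1

def pvFoldRuns (t : Int) (S R : List (Char × Nat)) : List (Char × Nat) :=
  R.foldl (pvStep t) S

def pvRLE : List Char → List (Char × Nat)
  | [] => []
  | c :: rest =>
    match pvRLE rest with
    | [] => [(c, 1)]
    | (d, m) :: R => if c = d then (c, m + 1) :: R else (c, 1) :: (d, m) :: R

theorem pvRLE_cons_nil (c : Char) (rest : List Char) (h : pvRLE rest = []) :
    pvRLE (c :: rest) = [(c, 1)] := by
  rw [pvRLE, h]

theorem pvRLE_cons_cons (c : Char) (rest : List Char) (d : Char) (m : Nat)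
    (R : List (Char × Nat)) (h : pvRLE rest = (d, m) :: R) :
    pvRLE (c :: rest) = if c = d then (c, m + 1) :: R else (c, 1) :: (d, m) :: R := by
  rw [pvRLE, h]

theorem pvRLE_head (x : Char) (xs : List Char) (d : Char) (m : Nat) (R : List (Char × Nat))
    (h : pvRLE (x :: xs) = (d, m) :: R) : d = x := by
  cases hx : pvRLE xs with
  | nil =>
    rw [pvRLE_cons_nil x xs hx] at h
    injection h with h1 _; injection h1 with h1 _; exact h1.symm
  | cons q Q =>
    obtain ⟨e, n⟩ := q
    rw [pvRLE_cons_cons x xs e n Q hx] at h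
    by_cases hc : x = e
    · rw [if_pos hc] at h; injection h with h1 _; injection h1 with h1 _; exact h1.symm
    · rw [if_neg hc] at h; injection h with h1 _; injection h1 with h1 _; exact h1.symm

theorem pvRLE_flat (l : List Char) : pvFlat (pvRLE l) = l := by
  induction l with
  | nil => rfl
  | cons c rest ih =>
    cases hx : pvRLE rest with
    | nil =>
      have hre : rest = [] := by
        rw [hx] at ih; simpa [pvFlat] using ih.symm
      rw [pvRLE_cons_nil c rest hx, hre]
      simp [pvFlat]
    | cons q Q =>
      obtain ⟨d, m⟩ := q
      rw [hx] at ih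
      rw [pvRLE_cons_cons c rest d m Q hx]
      by_cases hc : c = d
      · rw [if_pos hc, pvFlat_cons]
        rw [pvFlat_cons] at ih
        subst hc
        simp only [List.replicate_succ, List.cons_append]
        rw [ih]
      · rw [if_neg hc, pvFlat_cons]
        simp only [List.replicate_succ, List.replicate_zero, List.nil_append,
          List.cons_append]
        rw [ih]

theorem pvRLE_pos (l : List Char) : ∀ q ∈ pvRLE l, 1 ≤ q.2 := by
  induction l with
  | nil => intro q hq; simp [pvRLE] at hq
  | cons c rest ih =>
    intro q hq
    cases hx : pvRLE rest with
    | nil => rw [pvRLE_cons_nil c rest hx] at hq; simp at hq; subst hq; simp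
    | cons p Q =>
      obtain ⟨d, m⟩ := p
      rw [pvRLE_cons_cons c rest d m Q hx] at hq
      by_cases hc : c = d
      · rw [if_pos hc] at hq
        rcases List.mem_cons.mp hq with rfl | hq
        · simp
        · exact ih q (hx ▸ List.mem_cons_of_mem _ hq)
      · rw [if_neg hc] at hq
        rcases List.mem_cons.mp hq with rfl | hq
        · simp
        · exact ih q (hx ▸ hq)

theorem pvRLE_chain (l : List Char) :
    List.IsChain (fun p q => p.1 ≠ q.1) (pvRLE l) := by
  induction l with
  | nil => simp [pvRLE]
  | cons c rest ih =>
    cases hx : pvRLE rest with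
    | nil => rw [pvRLE_cons_nil c rest hx]; simp
    | cons p Q =>
      obtain ⟨d, m⟩ := p
      rw [hx] at ih
      rw [pvRLE_cons_cons c rest d m Q hx]
      by_cases hc : c = d
      · rw [if_pos hc]
        subst hc
        cases Q with
        | nil => simp
        | cons p2 Q2 =>
          rcases List.isChain_cons_cons.mp ih with ⟨h1, h2⟩
          exact List.isChain_cons_cons.mpr ⟨h1, h2⟩
      · rw [if_neg hc]
        exact List.isChain_cons_cons.mpr ⟨hc, ih⟩

theorem pvRLE_run (c : Char) :
    ∀ (k : Nat) (rest : List Char), rest.head? ≠ some c →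
      pvRLE (List.replicate (k + 1) c ++ rest) = (c, k + 1) :: pvRLE rest := by
  intro k
  induction k with
  | zero =>
    intro rest hr
    simp only [List.replicate_succ, List.replicate_zero, List.nil_append, List.cons_append]
    cases hx : pvRLE rest with
    | nil =>
      rw [pvRLE_cons_nil c rest hx]
    | cons p Q =>
      obtain ⟨d, m⟩ := p
      have hrest : rest ≠ [] := by
        intro h; rw [h] at hx; simp [pvRLE] at hx
      obtain ⟨y, ys, rfl⟩ := List.exists_cons_of_ne_nil hrest
      have hd : d = y := pvRLE_head y ys d m Q hx
      have hcy : c ≠ d := by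
        intro h
        apply hr
        subst hd
        rw [h]
        rfl
      rw [pvRLE_cons_cons c _ d m Q hx, if_neg hcy]
  | succ k ih =>
    intro rest hr
    have h2 : List.replicate (k + 2) c ++ rest = c :: (List.replicate (k + 1) c ++ rest) := by
      simp [List.replicate_succ]
    rw [h2, pvRLE_cons_cons c _ c (k + 1) (pvRLE rest) (ih rest hr), if_pos rfl]

theorem pvFlat_head (d : Char) (q : Nat) (R : List (Char × Nat)) (hq : 1 ≤ q) :
    (pvFlat ((d, q) :: R)).head? = some d := by
  rw [pvFlat_cons]
  obtain ⟨n, rfl⟩ : ∃ n, q = n + 1 := ⟨q - 1, by omega⟩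
  simp [List.replicate_succ]

theorem pvRLE_flat_id (R : List (Char × Nat))
    (hch : List.IsChain (fun p q => p.1 ≠ q.1) R) (hpos : ∀ p ∈ R, 1 ≤ p.2) :
    pvRLE (pvFlat R) = R := by
  induction R with
  | nil => rfl
  | cons q R' ih =>
    obtain ⟨c, m⟩ := q
    have hm : 1 ≤ m := hpos (c, m) (by simp)
    obtain ⟨n, rfl⟩ : ∃ n, m = n + 1 := ⟨m - 1, by omega⟩
    rw [pvFlat_cons]
    have hhead : (pvFlat R').head? ≠ some c := by
      cases R' with
      | nil => simp [pvFlat]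
      | cons p2 R2 =>
        obtain ⟨d, q2⟩ := p2
        rw [pvFlat_head d q2 R2 (hpos (d, q2) (by simp))]
        have hne : c ≠ d := (List.isChain_cons_cons.mp hch).1
        simp [Ne.symm hne]
    rw [pvRLE_run c n (pvFlat R') hhead]
    congr 1
    cases R' with
    | nil => rfl
    | cons p2 R2 =>
      exact ih (List.isChain_cons_cons.mp hch).2 (fun p hp => hpos p (List.mem_cons_of_mem _ hp))

-- the merge of two wf run lists at their seam, as recomputing the RLE performs it
def pvMerge (P S : List (Char × Nat)) : List (Char × Nat) :=
  match P.getLast?, S with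
  | some r, q :: S₀ => if r.1 = q.1 then P.dropLast ++ (r.1, r.2 + q.2) :: S₀ else P ++ S
  | _, _ => P ++ S

theorem pvMerge_cons (a : Char × Nat) (P S : List (Char × Nat)) (hP : P ≠ []) :
    pvMerge (a :: P) S = a :: pvMerge P S := by
  obtain ⟨b, P', rfl⟩ := List.exists_cons_of_ne_nil hP
  unfold pvMerge
  rw [List.getLast?_cons_cons]
  cases hl : (b :: P').getLast? with
  | none => simp at hl
  | some r =>
    cases S with
    | nil => simp
    | cons q S₀ =>
      dsimp only
      by_cases hc : r.1 = q.1
      · rw [if_pos hc, if_pos hc, List.dropLast_cons₂]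
        simp
      · rw [if_neg hc, if_neg hc]
        simp

theorem pvMerge_single (c : Char) (m : Nat) (d : Char) (k : Nat) (S₀ : List (Char × Nat)) :
    pvMerge [(c, m)] ((d, k) :: S₀)
      = if c = d then (c, m + k) :: S₀ else (c, m) :: (d, k) :: S₀ := by
  by_cases h : c = d
  · subst h
    simp [pvMerge]
  · simp [pvMerge, h]

theorem pvRLE_flat_append (P S : List (Char × Nat))
    (hchP : List.IsChain (fun p q => p.1 ≠ q.1) P) (hposP : ∀ p ∈ P, 1 ≤ p.2)
    (hchS : List.IsChain (fun p q => p.1 ≠ q.1) S) (hposS : ∀ p ∈ S, 1 ≤ p.2) :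
    pvRLE (pvFlat P ++ pvFlat S) = pvMerge P S := by
  induction P with
  | nil =>
    rw [pvFlat_nil, List.nil_append, pvRLE_flat_id S hchS hposS]
    rfl
  | cons a P' ih =>
    obtain ⟨c, m⟩ := a
    have hm : 1 ≤ m := hposP (c, m) (by simp)
    obtain ⟨n, rfl⟩ : ∃ n, m = n + 1 := ⟨m - 1, by omega⟩
    cases hP' : P' with
    | cons p2 R2 =>
      obtain ⟨d, q2⟩ := p2
      subst hP'
      have hcd : c ≠ d := (List.isChain_cons_cons.mp hchP).1
      have hq2 : 1 ≤ q2 := hposP (d, q2) (by simp [List.mem_cons])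
      have hhead : (pvFlat ((d, q2) :: R2) ++ pvFlat S).head? ≠ some c := by
        rw [List.head?_append_of_ne_nil]
        · rw [pvFlat_head d q2 R2 hq2]
          simp only [ne_eq, Option.some.injEq]
          exact fun h => hcd h.symm
        · rw [pvFlat_cons]
          intro hnil
          obtain ⟨n2, rfl⟩ : ∃ n2, q2 = n2 + 1 := ⟨q2 - 1, by omega⟩
          simp [List.replicate_succ] at hnil
      rw [pvFlat_cons, List.append_assoc, pvRLE_run c n _ hhead]
      rw [ih (List.isChain_cons_cons.mp hchP).2
            (fun p hp => hposP p (List.mem_cons_of_mem _ hp))]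
      rw [pvMerge_cons (c, n + 1) ((d, q2) :: R2) S (by simp)]
    | nil =>
      subst hP'
      simp only [pvFlat_cons, pvFlat_nil, List.append_nil]
      cases S with
      | nil =>
        have h0 := pvRLE_run c n [] (by simp)
        rw [List.append_nil] at h0
        rw [pvFlat_nil, List.append_nil, h0]
        rfl
      | cons q S₀ =>
        obtain ⟨d, q2⟩ := q
        have hq2 : 1 ≤ q2 := hposS (d, q2) (by simp)
        by_cases hc : c = d
        · subst hc
          obtain ⟨n2, rfl⟩ : ∃ n2, q2 = n2 + 1 := ⟨q2 - 1, by omega⟩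
          rw [pvFlat_cons]
          have hhead0 : (pvFlat S₀).head? ≠ some c := by
            cases S₀ with
            | nil => simp [pvFlat]
            | cons p3 R3 =>
              obtain ⟨e, q3⟩ := p3
              rw [pvFlat_head e q3 R3 (hposS (e, q3) (by simp [List.mem_cons]))]
              have hce : c ≠ e := (List.isChain_cons_cons.mp hchS).1
              simp only [ne_eq, Option.some.injEq]
              exact fun h => hce h.symm
          have hcomb : List.replicate (n + 1) c ++ (List.replicate (n2 + 1) c ++ pvFlat S₀)
              = List.replicate (((n + 1) + n2) + 1) c ++ pvFlat S₀ := by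
            rw [← List.append_assoc, ← List.replicate_add,
              show (n + 1) + (n2 + 1) = ((n + 1) + n2) + 1 by omega]
          rw [hcomb, pvRLE_run c ((n + 1) + n2) _ hhead0]
          rw [pvRLE_flat_id S₀ hchS.tail
            (fun p hp => hposS p (List.mem_cons_of_mem _ hp))]
          rw [pvMerge_single c (n + 1) c (n2 + 1) S₀, if_pos rfl,
            show (n + 1) + (n2 + 1) = ((n + 1) + n2) + 1 by omega]
        · have hhead : (pvFlat ((d, q2) :: S₀)).head? ≠ some c := by
            rw [pvFlat_head d q2 S₀ hq2]
            simp only [ne_eq, Option.some.injEq]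
            exact fun h => hc h.symm
          rw [pvFlat_cons]
          rw [show List.replicate (n + 1) c ++ (List.replicate q2 d ++ pvFlat S₀)
              = List.replicate (n + 1) c ++ pvFlat ((d, q2) :: S₀) by rw [pvFlat_cons]]
          rw [pvRLE_run c n _ hhead]
          rw [pvRLE_flat_id _ hchS hposS]
          rw [pvMerge_single c (n + 1) d q2 S₀, if_neg hc]

-- a stack holding only small runs, chained against the rest, is passed through unchanged
theorem pvSmallFix (t : Int) :
    ∀ (R S : List (Char × Nat)), (∀ q ∈ R, (q.2 : Int) < t) →
      List.IsChain (fun p q => p.1 ≠ q.1) (S ++ R) → pvFoldRuns t S R = S ++ R := by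
  intro R
  induction R with
  | nil => intro S _ _; simp [pvFoldRuns]
  | cons q R' ih =>
    intro S hsmall hch
    obtain ⟨c, k⟩ := q
    have hstep : pvStep t S (c, k) = S ++ [(c, k)] := by
      unfold pvStep
      cases hl : S.getLast? with
      | none =>
        simp only
        rw [if_pos (hsmall (c, k) (by simp))]
      | some r =>
        have hr : r.1 ≠ c := by
          have := (List.isChain_append.mp hch).2.2 r hl (c, k) (by simp)
          exact this
        simp only
        rw [if_neg hr, if_pos (hsmall (c, k) (by simp))]
    show pvFoldRuns t (pvStep t S (c, k)) R' = S ++ (c, k) :: R'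
    rw [hstep]
    have hch' : List.IsChain (fun p q => p.1 ≠ q.1) ((S ++ [(c, k)]) ++ R') := by
      rw [List.append_assoc]
      simpa using hch
    rw [ih (S ++ [(c, k)]) (fun p hp => hsmall p (List.mem_cons_of_mem _ hp)) hch']
    simp

-- A's run-level loop is the fold of pvStep over the RLE of the rest of the string
theorem pvRunsLoop_eq_fold (l : List Char) (t : Int) :
    ∀ fuel i S, l.length - i ≤ fuel →
      pvRunsLoop l t fuel S i = pvFoldRuns t S (pvRLE (l.drop i)) := by
  intro fuel
  induction fuel with
  | zero =>
    intro i S h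
    have : l.length ≤ i := by omega
    rw [pvRunsLoop, List.drop_eq_nil_of_le this]
    simp [pvRLE, pvFoldRuns]
  | succ fuel ih =>
    intro i S hfu
    by_cases hi : i < l.length
    case neg =>
      rw [pvRunsLoop, dif_neg hi, List.drop_eq_nil_of_le (by omega)]
      simp [pvRLE, pvFoldRuns]
    rw [pvRunsLoop, dif_pos hi]
    have hrun := pvRunLenB_eq l l[i] i hi rfl
    have hge := pvRunEndA_ge l l[i] (i + 1)
    have hle := pvRunEndA_le l l[i] (i + 1) hi
    have hslice := pvSlice_replicate l i hi
    have hstop := pvRunEndA_stop l l[i] (i + 1) (by omega)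
    generalize hc : l[i] = c at hrun hge hle hslice hstop ⊢
    generalize hj : pvRunEndA l c (i + 1) = j at hrun hge hle hslice hstop ⊢
    have hk : pvRunLenB l c i = j - i := by omega
    -- drop i l = replicate (j-i) c ++ drop j l
    have hdrop : l.drop i = List.replicate (j - i) c ++ l.drop j := by
      conv_lhs => rw [← List.take_append_drop (j - i) (l.drop i)]
      rw [hslice, List.drop_drop]
      congr 2
      omega
    have hhead : (l.drop j).head? ≠ some c := by
      by_cases hjl : j < l.length
      · rw [List.head?_drop]
        exact hstop hjl
      · rw [List.drop_eq_nil_of_le (by omega)]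
        simp
    have hrle : pvRLE (l.drop i) = (c, j - i) :: pvRLE (l.drop j) := by
      rw [hdrop]
      obtain ⟨n, hn⟩ : ∃ n, j - i = n + 1 := ⟨j - i - 1, by omega⟩
      rw [hn, pvRLE_run c n _ hhead, ← hn]
    rw [hrle]
    show _ = pvFoldRuns t (pvStep t S (c, j - i)) (pvRLE (l.drop j))
    have hrec : l.length - j ≤ fuel := by omega
    dsimp only
    rw [hk, show i + (j - i) = j by omega]
    unfold pvStep
    dsimp only
    split
    all_goals split_ifs
    all_goals exact ih j _ hrec

-- B's scan found nothing: every run of the rest is below the threshold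
theorem pvFindBAux_none (l : List Char) (t : Int) :
    ∀ fuel i, l.length - i < fuel → pvFindBAux l t fuel i = none →
      ∀ q ∈ pvRLE (l.drop i), (q.2 : Int) < t := by
  intro fuel
  induction fuel with
  | zero => intro i h; omega
  | succ fuel ih =>
    intro i hfu hnone
    by_cases hi : i < l.length
    case neg =>
      rw [List.drop_eq_nil_of_le (by omega)]
      simp [pvRLE]
    rw [pvFindBAux, dif_pos hi] at hnone
    dsimp only at hnone
    have hbe : pvRunEndB l l[i] i = pvRunEndA l l[i] (i + 1) := by
      unfold pvRunEndB pvRunEndA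
      obtain ⟨f2, hf2⟩ : ∃ f2, l.length - i = f2 + 1 := ⟨l.length - i - 1, by omega⟩
      rw [hf2, pvRunEndBAux, dif_pos hi, if_pos rfl]
      have hAux : ∀ fu j0, pvRunEndBAux l l[i] fu j0 = pvRunEndAux l l[i] fu j0 := by
        intro fu
        induction fu with
        | zero => intro j0; rw [pvRunEndBAux, pvRunEndAux]
        | succ fu ihf =>
          intro j0
          rw [pvRunEndBAux, pvRunEndAux]
          split_ifs with h1 h2
          · exact ihf (j0 + 1)
          · rfl
          · rfl
      rw [hAux]
      congr 1
      omega
    rw [hbe] at hnone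
    split_ifs at hnone with hbig
    have hrun := pvRunLenB_eq l l[i] i hi rfl
    have hge := pvRunEndA_ge l l[i] (i + 1)
    have hle := pvRunEndA_le l l[i] (i + 1) hi
    have hslice := pvSlice_replicate l i hi
    have hstop := pvRunEndA_stop l l[i] (i + 1) (by omega)
    generalize hc : l[i] = c at hrun hge hle hslice hstop hnone hbig ⊢
    generalize hj : pvRunEndA l c (i + 1) = j at hrun hge hle hslice hstop hnone hbig ⊢
    have hdrop : l.drop i = List.replicate (j - i) c ++ l.drop j := by
      conv_lhs => rw [← List.take_append_drop (j - i) (l.drop i)]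
      rw [hslice, List.drop_drop]
      congr 2
      omega
    have hhead : (l.drop j).head? ≠ some c := by
      by_cases hjl : j < l.length
      · rw [List.head?_drop]; exact hstop hjl
      · rw [List.drop_eq_nil_of_le (by omega)]; simp
    have hrle : pvRLE (l.drop i) = (c, j - i) :: pvRLE (l.drop j) := by
      rw [hdrop]
      obtain ⟨n, hn⟩ : ∃ n, j - i = n + 1 := ⟨j - i - 1, by omega⟩
      rw [hn, pvRLE_run c n _ hhead, ← hn]
    rw [hrle]
    intro q hq
    rcases List.mem_cons.mp hq with rfl | hq
    · show (((j - i : Nat) : Int)) < t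
      omega
    · exact ih j (by omega) hnone q hq

-- B's scan found the leftmost long-enough run: the RLE splits around it,
-- with every earlier run below the threshold
theorem pvFindBAux_some (l : List Char) (t : Int) :
    ∀ fuel i0 i j, l.length - i0 < fuel → pvFindBAux l t fuel i0 = some (i, j) →
      i0 ≤ i ∧ i < j ∧ j ≤ l.length ∧ ((j : Int) - (i : Int) ≥ t) ∧ i < l.length ∧
      pvRLE (l.drop i0)
        = pvRLE ((l.drop i0).take (i - i0)) ++ (l.getD i ' ', j - i) :: pvRLE (l.drop j) ∧
      (∀ q ∈ pvRLE ((l.drop i0).take (i - i0)), (q.2 : Int) < t) := by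
  intro fuel
  induction fuel with
  | zero => intro i0 i j h; omega
  | succ fuel ih =>
    intro i0 i j hfu hsome
    by_cases hi : i0 < l.length
    case neg => rw [pvFindBAux, dif_neg hi] at hsome; cases hsome
    rw [pvFindBAux, dif_pos hi] at hsome
    dsimp only at hsome
    have hbe : pvRunEndB l l[i0] i0 = pvRunEndA l l[i0] (i0 + 1) := by
      unfold pvRunEndB pvRunEndA
      obtain ⟨f2, hf2⟩ : ∃ f2, l.length - i0 = f2 + 1 := ⟨l.length - i0 - 1, by omega⟩
      rw [hf2, pvRunEndBAux, dif_pos hi, if_pos rfl]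
      have hAux : ∀ fu j0, pvRunEndBAux l l[i0] fu j0 = pvRunEndAux l l[i0] fu j0 := by
        intro fu
        induction fu with
        | zero => intro j0; rw [pvRunEndBAux, pvRunEndAux]
        | succ fu ihf =>
          intro j0
          rw [pvRunEndBAux, pvRunEndAux]
          split_ifs with h1 h2
          · exact ihf (j0 + 1)
          · rfl
          · rfl
      rw [hAux]
      congr 1
      omega
    rw [hbe] at hsome
    have hrun := pvRunLenB_eq l l[i0] i0 hi rfl
    have hge := pvRunEndA_ge l l[i0] (i0 + 1)
    have hle := pvRunEndA_le l l[i0] (i0 + 1) hi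
    have hslice := pvSlice_replicate l i0 hi
    have hstop := pvRunEndA_stop l l[i0] (i0 + 1) (by omega)
    have hgetd : l.getD i0 ' ' = l[i0] := by
      rw [List.getD, List.getElem?_eq_getElem hi]
      rfl
    generalize hc : l[i0] = c at hrun hge hle hslice hstop hsome hgetd
    generalize hj : pvRunEndA l c (i0 + 1) = j0 at hrun hge hle hslice hstop hsome
    have hdrop : l.drop i0 = List.replicate (j0 - i0) c ++ l.drop j0 := by
      conv_lhs => rw [← List.take_append_drop (j0 - i0) (l.drop i0)]
      rw [hslice, List.drop_drop]
      congr 2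
      omega
    have hhead : (l.drop j0).head? ≠ some c := by
      by_cases hjl : j0 < l.length
      · rw [List.head?_drop]; exact hstop hjl
      · rw [List.drop_eq_nil_of_le (by omega)]; simp
    have hrle : pvRLE (l.drop i0) = (c, j0 - i0) :: pvRLE (l.drop j0) := by
      rw [hdrop]
      obtain ⟨n, hn⟩ : ∃ n, j0 - i0 = n + 1 := ⟨j0 - i0 - 1, by omega⟩
      rw [hn, pvRLE_run c n _ hhead, ← hn]
    split_ifs at hsome with hbig
    · -- found at i0 itself
      injection hsome with hsome
      obtain ⟨rfl, rfl⟩ : i0 = i ∧ j0 = j := by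
        constructor
        · exact congrArg Prod.fst hsome
        · exact congrArg Prod.snd hsome
      refine ⟨le_refl _, by omega, by omega, hbig, hi, ?_, ?_⟩
      · rw [Nat.sub_self, List.take_zero]
        rw [hgetd]
        simpa [pvRLE] using hrle
      · rw [Nat.sub_self, List.take_zero]
        intro q hq
        simp [pvRLE] at hq
    · -- recurse from j0
      obtain ⟨h1, h2, h3, h4, h5, h6, h7⟩ := ih j0 i j (by omega) hsome
      refine ⟨by omega, h2, h3, h4, h5, ?_, ?_⟩
      · -- lift the decomposition from j0 to i0
        have htake : (l.drop i0).take (i - i0)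
            = List.replicate (j0 - i0) c ++ (l.drop j0).take (i - j0) := by
          have harg : i - i0 - (List.replicate (j0 - i0) c).length = i - j0 := by
            rw [List.length_replicate]; omega
          rw [hdrop, List.take_append,
            List.take_of_length_le (by rw [List.length_replicate]; omega), harg]
        have hheadt : ((l.drop j0).take (i - j0)).head? ≠ some c := by
          by_cases hz : i - j0 = 0
          · rw [hz, List.take_zero]; simp
          · obtain ⟨n2, hn2⟩ : ∃ n2, i - j0 = n2 + 1 := ⟨i - j0 - 1, by omega⟩
            cases hdj : l.drop j0 with
            | nil => rw [hn2]; simp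
            | cons y ys =>
              rw [hn2, List.take_succ_cons]
              rw [hdj] at hhead
              simpa using hhead
        have hrlet : pvRLE ((l.drop i0).take (i - i0))
            = (c, j0 - i0) :: pvRLE ((l.drop j0).take (i - j0)) := by
          rw [htake]
          obtain ⟨n, hn⟩ : ∃ n, j0 - i0 = n + 1 := ⟨j0 - i0 - 1, by omega⟩
          rw [hn, pvRLE_run c n _ hheadt, ← hn]
        rw [hrle, h6, hrlet]
        simp
      · intro q hq
        have htake : (l.drop i0).take (i - i0)
            = List.replicate (j0 - i0) c ++ (l.drop j0).take (i - j0) := by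
          have harg : i - i0 - (List.replicate (j0 - i0) c).length = i - j0 := by
            rw [List.length_replicate]; omega
          rw [hdrop, List.take_append,
            List.take_of_length_le (by rw [List.length_replicate]; omega), harg]
        have hheadt : ((l.drop j0).take (i - j0)).head? ≠ some c := by
          by_cases hz : i - j0 = 0
          · rw [hz, List.take_zero]; simp
          · obtain ⟨n2, hn2⟩ : ∃ n2, i - j0 = n2 + 1 := ⟨i - j0 - 1, by omega⟩
            cases hdj : l.drop j0 with
            | nil => rw [hn2]; simp
            | cons y ys =>
              rw [hn2, List.take_succ_cons]
              rw [hdj] at hhead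
              simpa using hhead
        have hrlet : pvRLE ((l.drop i0).take (i - i0))
            = (c, j0 - i0) :: pvRLE ((l.drop j0).take (i - j0)) := by
          rw [htake]
          obtain ⟨n, hn⟩ : ∃ n, j0 - i0 = n + 1 := ⟨j0 - i0 - 1, by omega⟩
          rw [hn, pvRLE_run c n _ hheadt, ← hn]
        rw [hrlet] at hq
        rcases List.mem_cons.mp hq with rfl | hq
        · show (((j0 - i0 : Nat) : Int)) < t
          omega
        · exact h7 q hq

-- deleting the found run commutes with the run-level fold
theorem pvFold_delete (t : Int) (P S : List (Char × Nat)) (c : Char) (m : Nat)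
    (hch : List.IsChain (fun p q => p.1 ≠ q.1) (P ++ (c, m) :: S))
    (hpos : ∀ p ∈ P ++ (c, m) :: S, 1 ≤ p.2)
    (hsmallP : ∀ q ∈ P, (q.2 : Int) < t) (hbig : (m : Int) ≥ t) :
    pvFoldRuns t [] (P ++ (c, m) :: S) = pvFoldRuns t [] (pvMerge P S) := by
  have hchP : List.IsChain (fun p q => p.1 ≠ q.1) P := (List.isChain_append.mp hch).1
  have hchS : List.IsChain (fun p q => p.1 ≠ q.1) ((c, m) :: S) :=
    (List.isChain_append.mp hch).2.1
  have hchS' : List.IsChain (fun p q => p.1 ≠ q.1) S := hchS.tail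
  have hposP : ∀ p ∈ P, 1 ≤ p.2 := fun p hp => hpos p (List.mem_append_left _ hp)
  have hposS : ∀ p ∈ S, 1 ≤ p.2 := fun p hp =>
    hpos p (List.mem_append_right _ (List.mem_cons_of_mem _ hp))
  -- left side: fold over P passes through, then the big run drops the (absent) merge
  have hfoldP : pvFoldRuns t [] P = P := by
    have := pvSmallFix t P [] hsmallP (by simpa using hchP)
    simpa using this
  have hL : pvFoldRuns t [] (P ++ (c, m) :: S) = pvFoldRuns t P S := by
    unfold pvFoldRuns
    rw [List.foldl_append]
    show pvFoldRuns t (pvFoldRuns t [] P) ((c, m) :: S) = _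
    rw [hfoldP]
    show List.foldl (pvStep t) (pvStep t P (c, m)) S = _
    have hstep : pvStep t P (c, m) = P := by
      unfold pvStep
      cases hl : P.getLast? with
      | none =>
        dsimp only
        rw [if_neg (by omega)]
      | some r =>
        have hr : r.1 ≠ c := (List.isChain_append.mp hch).2.2 r hl (c, m) (by simp)
        dsimp only
        rw [if_neg hr, if_neg (by omega)]
    rw [hstep]
  rw [hL]
  -- right side by cases on the seam
  rcases P.eq_nil_or_concat' with rfl | ⟨P₀, r, rfl⟩
  · unfold pvMerge
    simp
  · obtain ⟨e, p⟩ := r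
    have hchP₀ : List.IsChain (fun p q => p.1 ≠ q.1) P₀ := (List.isChain_append.mp hchP).1
    have hsmallP₀ : ∀ q ∈ P₀, (q.2 : Int) < t := fun q hq =>
      hsmallP q (List.mem_append_left _ hq)
    have hfoldP₀ : pvFoldRuns t [] P₀ = P₀ := by
      have := pvSmallFix t P₀ [] hsmallP₀ (by simpa using hchP₀)
      simpa using this
    have hlastP₀ : ∀ r0, P₀.getLast? = some r0 → r0.1 ≠ e :=
      fun r0 h0 => pvWF_concat_last ⟨hchP, hposP⟩ h0
    cases S with
    | nil =>
      unfold pvMerge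
      rw [List.getLast?_concat]
      dsimp only
      rw [List.append_nil]
      show pvFoldRuns t (P₀ ++ [(e, p)]) [] = pvFoldRuns t [] (P₀ ++ [(e, p)])
      rw [show pvFoldRuns t (P₀ ++ [(e, p)]) [] = P₀ ++ [(e, p)] from rfl]
      exact hfoldP.symm
    | cons q S₀ =>
      obtain ⟨d, q2⟩ := q
      unfold pvMerge
      rw [List.getLast?_concat]
      dsimp only
      by_cases hed : e = d
      · rw [if_pos hed]
        subst hed
        rw [List.dropLast_concat]
        -- LHS: fold (P₀++[(e,p)]) ((e,q2)::S₀) merges the seam pair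
        have hLHS : pvFoldRuns t (P₀ ++ [(e, p)]) ((e, q2) :: S₀)
            = pvFoldRuns t (pvStep t (P₀ ++ [(e, p)]) (e, q2)) S₀ := rfl
        have hstepL : pvStep t (P₀ ++ [(e, p)]) (e, q2)
            = if ((q2 + p : Nat) : Int) < t then P₀ ++ [(e, q2 + p)] else P₀ := by
          unfold pvStep
          rw [List.getLast?_concat]
          dsimp only
          rw [if_pos rfl, List.dropLast_concat]
        -- RHS: fold [] (P₀ ++ (e, p+q2) :: S₀)
        have hRHS : pvFoldRuns t [] (P₀ ++ (e, p + q2) :: S₀)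
            = pvFoldRuns t (pvStep t P₀ (e, p + q2)) S₀ := by
          unfold pvFoldRuns
          rw [List.foldl_append]
          show List.foldl (pvStep t) (pvStep t (pvFoldRuns t [] P₀) (e, p + q2)) S₀ = _
          rw [hfoldP₀]
        have hstepR : pvStep t P₀ (e, p + q2)
            = if ((p + q2 : Nat) : Int) < t then P₀ ++ [(e, p + q2)] else P₀ := by
          unfold pvStep
          cases hl : P₀.getLast? with
          | none =>
            dsimp only
          | some r0 =>
            dsimp only
            rw [if_neg (hlastP₀ r0 hl)]
        rw [hLHS, hstepL, hRHS, hstepR]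
        rw [show q2 + p = p + q2 by omega]
      · rw [if_neg hed]
        -- no merge at the seam: fold [] (P ++ S) = fold P S
        unfold pvFoldRuns
        rw [List.foldl_append]
        show _ = List.foldl (pvStep t) (List.foldl (pvStep t) [] (P₀ ++ [(e, p)])) ((d, q2) :: S₀)
        have : List.foldl (pvStep t) ([] : List (Char × Nat)) (P₀ ++ [(e, p)])
            = P₀ ++ [(e, p)] := hfoldP
        rw [this]

-- main equivalence at the list level
theorem pvMain (t : Int) :
    ∀ fuel (l : List Char), l.length < fuel →
      pvFlat (pvFoldRuns t [] (pvRLE l)) = pvOuterB t fuel l := by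
  intro fuel
  induction fuel with
  | zero => intro l h; omega
  | succ fuel ih =>
    intro l hlen
    rw [pvOuterB]
    cases hf : pvFindBAux l t (l.length + 1) 0 with
    | none =>
      have hsmall := pvFindBAux_none l t (l.length + 1) 0 (by omega) hf
      rw [List.drop_zero] at hsmall
      have := pvSmallFix t (pvRLE l) [] hsmall (by simpa using pvRLE_chain l)
      rw [show pvFoldRuns t [] (pvRLE l) = pvRLE l by simpa using this]
      exact pvRLE_flat l
    | some ij =>
      obtain ⟨i, j⟩ := ij
      obtain ⟨-, hij, hjl, hbig, hil, hdec, hsmallP⟩ :=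
        pvFindBAux_some l t (l.length + 1) 0 i j (by omega) hf
      rw [List.drop_zero] at hdec hsmallP
      rw [Nat.sub_zero] at hdec hsmallP
      set P := pvRLE (l.take i) with hP
      set S := pvRLE (l.drop j) with hS
      set c := l.getD i ' ' with hc
      have hchain : List.IsChain (fun p q => p.1 ≠ q.1) (P ++ (c, j - i) :: S) := by
        rw [← hdec]; exact pvRLE_chain l
      have hpos : ∀ p ∈ P ++ (c, j - i) :: S, 1 ≤ p.2 := by
        rw [← hdec]; exact pvRLE_pos l
      have hbig' : (((j - i : Nat)) : Int) ≥ t := by omega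
      have hstep1 : pvFoldRuns t [] (pvRLE l) = pvFoldRuns t [] (pvMerge P S) := by
        rw [hdec]
        exact pvFold_delete t P S c (j - i) hchain hpos hsmallP hbig'
      have hchP : List.IsChain (fun p q => p.1 ≠ q.1) P := (List.isChain_append.mp hchain).1
      have hchS : List.IsChain (fun p q => p.1 ≠ q.1) S :=
        ((List.isChain_append.mp hchain).2.1).tail
      have hposP : ∀ p ∈ P, 1 ≤ p.2 := fun p hp => hpos p (List.mem_append_left _ hp)
      have hposS : ∀ p ∈ S, 1 ≤ p.2 := fun p hp =>
        hpos p (List.mem_append_right _ (List.mem_cons_of_mem _ hp))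
      have hmerge : pvRLE (l.take i ++ l.drop j) = pvMerge P S := by
        have h1 : l.take i = pvFlat P := (hP ▸ (pvRLE_flat (l.take i))).symm
        have h2 : l.drop j = pvFlat S := (hS ▸ (pvRLE_flat (l.drop j))).symm
        rw [h1, h2]
        exact pvRLE_flat_append P S hchP hposP hchS hposS
      have hlen' : (l.take i ++ l.drop j).length < fuel := by
        rw [List.length_append, List.length_take, List.length_drop]
        omega
      rw [hstep1, ← hmerge]
      exact ih (l.take i ++ l.drop j) hlen'

-- ===== VERDICT (by name: the statement is the Claim_ definition above) =====
theorem remove_duplicate_by_count_spec : Claim_equal_remove_duplicate_by_count := by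
  intro s threshold _
  unfold Spec_remove_duplicate_by_count remove_duplicate_by_count remove_duplicate_by_count_alt
  rw [show ([] : List Char) = pvFlat [] from rfl,
      pvLoop_eq s.toList threshold s.toList.length 0 [] ⟨by simp, by simp⟩]
  rw [pvRunsLoop_eq_fold s.toList threshold s.toList.length 0 [] (by omega)]
  rw [List.drop_zero]
  rw [pvMain threshold (s.toList.length + 1) s.toList (by omega)]
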